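-- pv_equiv track=rewrite | github.com/Dirtytrii/leetcodePython | 学习计划/新技术概论/作业/day1/better_split_number.py | dp
-- ===== SOURCE A (Python) =====
-- from typing import List
--
-- def dp(n: int) -> List[List[int]]:
--     m = n
--     f = [[0] * (n + 1) for _ in range((n + 1))]
--     for i in range(1, n + 1):
--         for j in range(1, m + 1):
--             if i == 1 or j == 1:
--                 f[i][j] = 1
--             elif i == j:
--                 f[i][j] = f[i][j - 1] + 1
--             elif i < j:
--                 f[i][j] = f[i][i]
--             else:
--                 f[i][j] = f[i - j][j] + f[i][j - 1]
--
--     return f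
-- ===== SOURCE B (Python) =====
-- from typing import List
--
-- def dp(n: int) -> List[List[int]]:
--     f = [[0] * (n + 1) for _ in range(n + 1)]
--     d = [1] + [0] * n  # d[s] = number of partitions of s into parts <= current p (d[0] stays 1, internal only)
--     for p in range(1, n + 1):
--         for s in range(p, n + 1):
--             d[s] += d[s - p]
--         for i in range(1, n + 1):
--             f[i][p] = d[i]
--     return f
-- ===== Notes on version B (the rewrite author's own statement) =====
-- stated objective: alternative
-- what changed: Replaces the per-cell four-branch 2D recurrence with the classic 1D knapsack partition count: a single dp array swept once per part size p (dp[s] += dp[s-p]), whose state is copied into column p of the table after each sweep.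
import Mathlib
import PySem

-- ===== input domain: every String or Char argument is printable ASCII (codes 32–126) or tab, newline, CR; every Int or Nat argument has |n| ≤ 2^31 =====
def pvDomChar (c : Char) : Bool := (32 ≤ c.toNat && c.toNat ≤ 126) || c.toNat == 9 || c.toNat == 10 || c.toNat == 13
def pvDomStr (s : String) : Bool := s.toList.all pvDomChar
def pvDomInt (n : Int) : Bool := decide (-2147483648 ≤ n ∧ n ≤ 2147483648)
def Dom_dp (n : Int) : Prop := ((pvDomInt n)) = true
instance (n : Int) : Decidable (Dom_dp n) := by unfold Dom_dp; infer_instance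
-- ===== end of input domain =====

-- B re-implements the partition-count table with a 1D knapsack sweep per part size (dp[s] += dp[s-p])
-- copied into column p, instead of A's four-branch 2D recurrence; equal return value, no speed claim.

-- ===== PORT A =====
-- Python 'f[i][j]' read; indices produced by A's loops are nonnegative and in range, where pyGetD is exact.
def dpGet2 (f : List (List Int)) (i j : Int) : Int :=
  PySem.List.pyGetD (PySem.List.pyGetD f i []) j 0

-- Python 'f[i][j] = v' (rows are distinct list objects, so set-on-copy is exact for the in-range indices used).
def dpSet2 (f : List (List Int)) (i j : Int) (v : Int) : List (List Int) :=
  PySem.List.pySetD f i (PySem.List.pySetD (PySem.List.pyGetD f i []) j v)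

-- the four-branch right-hand side assigned to f[i][j], in A's branch order
def dpCell (f : List (List Int)) (i j : Int) : Int :=
  if i = 1 ∨ j = 1 then 1
  else if i = j then dpGet2 f i (j - 1) + 1
  else if i < j then dpGet2 f i i
  else dpGet2 f (i - j) j + dpGet2 f i (j - 1)

def dp (n : Int) : List (List Int) :=
  let m := n
  let f0 : List (List Int) :=
    (PySem.List.pyRange 0 (n + 1) 1).map (fun _ => PySem.List.pyRepeat [(0 : Int)] (n + 1))
  (PySem.List.pyRange 1 (n + 1) 1).foldl (fun f i =>
    (PySem.List.pyRange 1 (m + 1) 1).foldl (fun f j =>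
      dpSet2 f i j (dpCell f i j)) f) f0

-- ===== PORT B =====
-- B's 'f[i][p] = v' is the same element assignment, so it reuses the indexing helper dpSet2.

def dp_alt (n : Int) : List (List Int) :=
  let f0 : List (List Int) :=
    (PySem.List.pyRange 0 (n + 1) 1).map (fun _ => PySem.List.pyRepeat [(0 : Int)] (n + 1))
  let d0 : List Int := [1] ++ PySem.List.pyRepeat [(0 : Int)] n
  let st :=
    (PySem.List.pyRange 1 (n + 1) 1).foldl (fun (st : List (List Int) × List Int) p =>
      let d := (PySem.List.pyRange p (n + 1) 1).foldl (fun d s =>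
        PySem.List.pySetD d s (PySem.List.pyGetD d s 0 + PySem.List.pyGetD d (s - p) 0)) st.2
      let f := (PySem.List.pyRange 1 (n + 1) 1).foldl (fun f i =>
        dpSet2 f i p (PySem.List.pyGetD d i 0)) st.1
      (f, d)) (f0, d0)
  st.1

-- ===== PRECONDITION & SPEC =====
def Spec_dp (n : Int) (out : List (List Int)) : Prop := out = dp_alt n
instance (n : Int) (out : List (List Int)) : Decidable (Spec_dp n out) := by unfold Spec_dp; infer_instance

-- ===== CLAIM (what is proved, stated in full; the proofs are below) =====
def Claim_equal_dp : Prop := ∀ (n : Int), Dom_dp n → Spec_dp n (dp n)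

-- ===== LEMMAS AND PROOFS =====

def P : Nat → Nat → Int
  | 0, _ => 1
  | _+1, 0 => 0
  | s+1, p+1 => P (s+1) p + (if p + 1 ≤ s + 1 then P (s - p) (p+1) else 0)
termination_by s p => s + p
decreasing_by all_goals omega

def F (x y : Nat) : Int := if x = 0 ∨ y = 0 then 0 else P x y

def vec (N : Nat) (h : Nat → Int) : List Int := (List.range N).map h

def tbl (N : Nat) (g : Nat → Nat → Int) : List (List Int) := (List.range N).map (fun i => vec N (g i))

theorem P_unfold (s p : Nat) :
    P (s+1) (p+1) = P (s+1) p + (if p + 1 ≤ s + 1 then P (s - p) (p+1) else 0) := by rw [P]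

theorem P_zero_left (p : Nat) : P 0 p = 1 := by rw [P]

theorem P_succ_zero (s : Nat) : P (s+1) 0 = 0 := by rw [P]

theorem P_one_right (s : Nat) : P s 1 = 1 := by
  induction s with
  | zero => exact P_zero_left 1
  | succ s ih => rw [show (1:Nat) = 0 + 1 from rfl, P_unfold, if_pos (by omega), P_succ_zero]
                 simpa using ih

theorem P_rec {s p : Nat} (hp : 1 ≤ p) (hs : p ≤ s) : P s p = P s (p-1) + P (s-p) p := by
  obtain ⟨a, rfl⟩ : ∃ a, s = a + 1 := ⟨s - 1, by omega⟩
  obtain ⟨b, rfl⟩ : ∃ b, p = b + 1 := ⟨p - 1, by omega⟩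
  rw [P_unfold, if_pos (by omega)]
  have h1 : b + 1 - 1 = b := by omega
  have h2 : a + 1 - (b + 1) = a - b := by omega
  rw [h1, h2]

theorem P_stab {s p : Nat} (h : s ≤ p) : P s (p+1) = P s p := by
  cases s with
  | zero => rw [P_zero_left, P_zero_left]
  | succ t => rw [P_unfold, if_neg (by omega)]; ring

theorem P_eq_diag {s p : Nat} (h : s ≤ p) : P s p = P s s := by
  induction p with
  | zero => have : s = 0 := by omega
            subst this; rfl
  | succ p ih =>
    by_cases hsp : s ≤ p
    · rw [P_stab hsp, ih hsp]
    · have : s = p + 1 := by omega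
      rw [this]

theorem getD_map_range {α : Type} (f : Nat → α) {N i : Nat} (h : i < N) (d : α) :
    ((List.range N).map f).getD i d = f i := by
  rw [List.getD_eq_getElem?_getD]
  simp [List.getElem?_map, List.getElem?_range h]

theorem set_map_range {α : Type} (f : Nat → α) (N j : Nat) (v : α) :
    ((List.range N).map f).set j v = (List.range N).map (fun y => if y = j then v else f y) := by
  apply List.ext_getElem
  · simp
  · intro k h1 h2
    simp only [List.getElem_set, List.getElem_map, List.getElem_range]
    split_ifs with ha hb hb <;> first | rfl | omega

theorem vec_getD (N : Nat) (h : Nat → Int) {i : Nat} (hi : i < N) (d : Int) :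
    (vec N h).getD i d = h i := getD_map_range h hi d

theorem vec_set (N : Nat) (h : Nat → Int) (j : Nat) (v : Int) :
    (vec N h).set j v = vec N (fun y => if y = j then v else h y) := set_map_range h N j v

theorem vec_congr {N : Nat} {h h' : Nat → Int} (he : ∀ y, y < N → h y = h' y) :
    vec N h = vec N h' := by
  unfold vec
  apply List.map_congr_left
  intro y hy
  exact he y (List.mem_range.mp hy)

theorem tbl_getD (N : Nat) (g : Nat → Nat → Int) {i : Nat} (hi : i < N) :
    (tbl N g).getD i [] = vec N (g i) := getD_map_range _ hi []

theorem tbl_get2 (N : Nat) (g : Nat → Nat → Int) {i j : Nat} (hi : i < N) (hj : j < N) :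
    ((tbl N g).getD i []).getD j 0 = g i j := by
  rw [tbl_getD N g hi, vec_getD N _ hj]

theorem tbl_set (N : Nat) (g : Nat → Nat → Int) {i : Nat} (hi : i < N) (j : Nat) (v : Int) :
    (tbl N g).set i (((tbl N g).getD i []).set j v)
      = tbl N (fun x y => if x = i ∧ y = j then v else g x y) := by
  rw [tbl_getD N g hi, vec_set]
  unfold tbl
  rw [set_map_range]
  apply List.map_congr_left
  intro x hx
  by_cases hxi : x = i
  · subst hxi
    rw [if_pos rfl]
    apply vec_congr; intro y hy
    by_cases hyj : y = j <;> simp [hyj]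
  · rw [if_neg hxi]
    apply vec_congr; intro y hy
    simp [hxi]

theorem tbl_congr {N : Nat} {g g' : Nat → Nat → Int}
    (he : ∀ x, x < N → ∀ y, y < N → g x y = g' x y) : tbl N g = tbl N g' := by
  unfold tbl
  apply List.map_congr_left
  intro x hx
  exact vec_congr (he x (List.mem_range.mp hx))

theorem foldl_range_inv {α : Type} {step : α → Nat → α} {st : Nat → α} (t : Nat)
    (h : ∀ k, k < t → step (st k) k = st (k + 1)) :
    (List.range t).foldl step (st 0) = st t := by
  induction t with
  | zero => simp
  | succ t ih =>
    rw [List.range_succ, List.foldl_append,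
      ih (fun k hk => h k (Nat.lt_succ_of_lt hk)), List.foldl_cons, List.foldl_nil,
      h t (Nat.lt_succ_self t)]
-- ports pasted for scratch
theorem P_one_left {p : Nat} (h : 1 ≤ p) : P 1 p = 1 := by
  rw [P_eq_diag h, P_one_right]

theorem F_zero {x y : Nat} (h : x = 0 ∨ y = 0) : F x y = 0 := by simp [F, h]

theorem F_pos {x y : Nat} (hx : 1 ≤ x) (hy : 1 ≤ y) : F x y = P x y := by
  unfold F
  rw [if_neg (by omega)]

def gA (i c : Nat) (x y : Nat) : Int := if x < i ∨ (x = i ∧ y ≤ c) then F x y else 0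

theorem stepA_eq (nn i c : Nat) (hi1 : 1 ≤ i) (hi : i ≤ nn) (hc : c + 1 ≤ nn) :
    dpSet2 (tbl (nn+1) (gA i c)) ↑i ↑(c+1) (dpCell (tbl (nn+1) (gA i c)) ↑i ↑(c+1))
      = tbl (nn+1) (gA i (c+1)) := by
  have hiN : i < nn + 1 := by omega
  have hcN : c + 1 < nn + 1 := by omega
  have hcN' : c < nn + 1 := by omega
  have hval : dpCell (tbl (nn+1) (gA i c)) ↑i ↑(c+1) = F i (c+1) := by
    unfold dpCell dpGet2
    by_cases h1 : (↑i : Int) = 1 ∨ (↑(c+1) : Int) = 1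
    · rw [if_pos h1]
      rcases h1 with h1 | h1
      · have : i = 1 := by exact_mod_cast h1
        subst this
        rw [F_pos (by omega) (by omega), P_one_left (by omega)]
      · have hc0 : c = 0 := by
          have : c + 1 = 1 := by exact_mod_cast h1
          omega
        subst hc0
        rw [F_pos (by omega) (by omega), P_one_right]
    · rw [if_neg h1]
      push Not at h1
      have hi2 : 2 ≤ i := by
        have := h1.1
        omega
      have hc1 : 1 ≤ c := by
        have := h1.2
        omega
      by_cases h2 : (↑i : Int) = ↑(c+1)
      · rw [if_pos h2]
        have hic : i = c + 1 := by exact_mod_cast h2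
        have : (↑(c+1) : Int) - 1 = ↑c := by push_cast; ring
        rw [this]
        simp only [PySem.List.pyGetD_natCast]
        rw [tbl_get2 _ _ hiN hcN']
        have hg : gA i c i c = F i c := by unfold gA; rw [if_pos (by omega)]
        rw [hg, F_pos (by omega) hc1, F_pos (by omega) (by omega), hic]
        rw [P_rec (by omega) (le_refl _)]
        simp [P_zero_left]
      · rw [if_neg h2]
        by_cases h3 : (↑i : Int) < ↑(c+1)
        · rw [if_pos h3]
          have hlt : i < c + 1 := by exact_mod_cast h3
          simp only [PySem.List.pyGetD_natCast]
          rw [tbl_get2 _ _ hiN hiN]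
          have hg : gA i c i i = F i i := by unfold gA; rw [if_pos (by omega)]
          rw [hg, F_pos (by omega) (by omega), F_pos (by omega) (by omega)]
          exact (P_eq_diag (by omega)).symm
        · rw [if_neg h3]
          have hgt : c + 1 < i := by
            have := lt_of_le_of_ne (not_lt.mp h3) (fun e => h2 e.symm)
            exact_mod_cast this
          have e1 : (↑i : Int) - ↑(c+1) = ↑(i - (c+1)) := by omega
          have e2 : (↑(c+1) : Int) - 1 = ↑c := by push_cast; ring
          rw [e1, e2]
          simp only [PySem.List.pyGetD_natCast]
          rw [tbl_get2 _ _ (by omega) hcN, tbl_get2 _ _ hiN hcN']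
          have hg1 : gA i c (i - (c+1)) (c+1) = F (i - (c+1)) (c+1) := by
            unfold gA; rw [if_pos (by omega)]
          have hg2 : gA i c i c = F i c := by unfold gA; rw [if_pos (by omega)]
          rw [hg1, hg2, F_pos (by omega) (by omega), F_pos (by omega) hc1,
            F_pos (by omega) (by omega)]
          conv_rhs => rw [P_rec (show 1 ≤ c + 1 by omega) (show c + 1 ≤ i by omega)]
          have h4 : c + 1 - 1 = c := by omega
          rw [h4]
          ring
  rw [hval]
  unfold dpSet2
  simp only [PySem.List.pyGetD_natCast, PySem.List.pySetD_natCast]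
  rw [tbl_set _ _ hiN]
  apply tbl_congr
  intro x hx y hy
  unfold gA
  by_cases hxy : x = i ∧ y = c + 1
  · rw [if_pos hxy, if_pos (show x < i ∨ (x = i ∧ y ≤ c + 1) by omega), hxy.1, hxy.2]
  · rw [if_neg hxy]
    by_cases hcond : x < i ∨ (x = i ∧ y ≤ c)
    · rw [if_pos hcond, if_pos (by omega)]
    · rw [if_neg hcond, if_neg (by omega)]

theorem innerA (nn i : Nat) (hi1 : 1 ≤ i) (hi : i ≤ nn) :
    (List.range nn).foldl (fun f (k : Nat) => dpSet2 f ↑i ((1 : Int) + ↑k) (dpCell f ↑i ((1 : Int) + ↑k)))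
      (tbl (nn+1) (gA i 0)) = tbl (nn+1) (gA i nn) := by
  apply foldl_range_inv (st := fun c => tbl (nn+1) (gA i c))
  intro c hc
  have e : (1 : Int) + ↑c = ↑(c+1) := by push_cast; ring
  rw [e]
  exact stepA_eq nn i c hi1 hi (by omega)

theorem gA_row_done (nn i : Nat) :
    tbl (nn+1) (gA i nn) = tbl (nn+1) (gA (i+1) 0) := by
  apply tbl_congr
  intro x hx y hy
  unfold gA
  by_cases h1 : x < i ∨ (x = i ∧ y ≤ nn)
  · rw [if_pos h1]
    by_cases h2 : x < i + 1 ∨ (x = i + 1 ∧ y ≤ 0)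
    · rw [if_pos h2]
    · omega
  · rw [if_neg h1]
    by_cases h2 : x < i + 1 ∨ (x = i + 1 ∧ y ≤ 0)
    · rw [if_pos h2, F_zero (by omega)]
    · rw [if_neg h2]

theorem outerA (nn : Nat) :
    (List.range nn).foldl (fun f (r : Nat) =>
        (List.range nn).foldl (fun f (k : Nat) =>
          dpSet2 f ((1 : Int) + ↑r) ((1 : Int) + ↑k) (dpCell f ((1 : Int) + ↑r) ((1 : Int) + ↑k))) f)
      (tbl (nn+1) (gA 1 0)) = tbl (nn+1) (gA (nn+1) 0) := by
  apply foldl_range_inv (st := fun r => tbl (nn+1) (gA (r+1) 0))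
  intro r hr
  have e : (1 : Int) + ↑r = ↑(r+1) := by push_cast; ring
  rw [e]
  rw [innerA nn (r+1) (by omega) (by omega), gA_row_done]

theorem vec_zero (N : Nat) : vec N (fun _ => (0 : Int)) = List.replicate N 0 := by
  simp [vec, List.map_const']

theorem gA_init (N : Nat) : tbl N (fun _ _ => (0 : Int)) = tbl N (gA 1 0) := by
  apply tbl_congr
  intro x hx y hy
  unfold gA
  by_cases h : x < 1 ∨ (x = 1 ∧ y ≤ 0)
  · rw [if_pos h, F_zero (by omega)]
  · rw [if_neg h]

theorem gA_full (nn : Nat) : tbl (nn+1) (gA (nn+1) 0) = tbl (nn+1) F := by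
  apply tbl_congr
  intro x hx y hy
  unfold gA
  rw [if_pos (by omega)]

theorem dpA_closed {n : Int} (hn : 0 ≤ n) : dp n = tbl (n.toNat + 1) F := by
  unfold dp
  have h1 : n + 1 - 1 = n := by ring
  have h2 : (n + 1).toNat = n.toNat + 1 := by omega
  have h3 : n + 1 - 0 = n + 1 := by ring
  simp only [PySem.List.pyRange_one, PySem.List.pyRepeat_singleton, h1, h3, h2,
    List.foldl_map, List.map_map]
  have hf0 : (List.range (n.toNat + 1)).map
      ((fun _ => List.replicate (n.toNat + 1) (0 : Int)) ∘ (fun k => (0 : Int) + ↑k))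
      = tbl (n.toNat + 1) (gA 1 0) := by
    rw [← gA_init]
    unfold tbl
    apply List.map_congr_left
    intro x hx
    rw [vec_zero]
    rfl
  rw [hf0]
  have := outerA n.toNat
  rw [← gA_full]
  exact this

def gB (p x y : Nat) : Int := if y ≤ p then F x y else 0
def gC (p k x y : Nat) : Int := if y < p ∨ (y = p ∧ x ≤ k) then F x y else 0
def hD (p t s : Nat) : Int := if s < t then P s p else P s (p-1)

theorem sweep_step (nn p k : Nat) (hp1 : 1 ≤ p) (hk : p + k < nn + 1) :
    PySem.List.pySetD (vec (nn+1) (hD p (p+k))) (↑p + ↑k : Int)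
      (PySem.List.pyGetD (vec (nn+1) (hD p (p+k))) (↑p + ↑k : Int) 0
        + PySem.List.pyGetD (vec (nn+1) (hD p (p+k))) ((↑p + ↑k : Int) - ↑p) 0)
      = vec (nn+1) (hD p (p+k+1)) := by
  have e1 : (↑p + ↑k : Int) = ↑(p+k) := by omega
  have e2 : (↑p + ↑k : Int) - ↑p = ↑k := by omega
  rw [e2, e1]
  simp only [PySem.List.pyGetD_natCast, PySem.List.pySetD_natCast]
  rw [vec_getD _ _ hk, vec_getD _ _ (by omega), vec_set]
  apply vec_congr
  intro y hy
  unfold hD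
  by_cases hy1 : y = p + k
  · subst hy1
    rw [if_pos rfl, if_neg (show ¬ (p + k < p + k) by omega),
      if_pos (show k < p + k by omega), if_pos (show p + k < p + k + 1 by omega)]
    rw [P_rec hp1 (show p ≤ p + k by omega)]
    have h5 : p + k - p = k := by omega
    rw [h5]
  · rw [if_neg hy1]
    by_cases hy2 : y < p + k
    · rw [if_pos hy2, if_pos (by omega)]
    · rw [if_neg hy2, if_neg (by omega)]

theorem sweepB (nn p : Nat) (hp1 : 1 ≤ p) (_hp : p ≤ nn) :
    (List.range (nn+1-p)).foldl (fun d (k : Nat) =>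
      PySem.List.pySetD d ((↑p : Int) + ↑k)
        (PySem.List.pyGetD d ((↑p : Int) + ↑k) 0 + PySem.List.pyGetD d (((↑p : Int) + ↑k) - ↑p) 0))
      (vec (nn+1) (fun s => P s (p-1))) = vec (nn+1) (fun s => P s p) := by
  have h0 : vec (nn+1) (fun s => P s (p-1)) = vec (nn+1) (hD p (p+0)) := by
    apply vec_congr
    intro y hy
    unfold hD
    by_cases h : y < p + 0
    · rw [if_pos h, P_eq_diag (show y ≤ p - 1 by omega)]
      exact (P_eq_diag (by omega)).symm
    · rw [if_neg h]
  have hend : vec (nn+1) (hD p (p + (nn+1-p))) = vec (nn+1) (fun s => P s p) := by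
    apply vec_congr
    intro y hy
    unfold hD
    rw [if_pos (by omega)]
  rw [h0, ← hend]
  apply foldl_range_inv (st := fun k => vec (nn+1) (hD p (p+k)))
  intro k hk
  exact sweep_step nn p k hp1 (by omega)

theorem col_step (nn p k : Nat) (hp1 : 1 ≤ p) (_hp : p ≤ nn) (hk : k < nn) :
    dpSet2 (tbl (nn+1) (gC p k)) ((1 : Int) + ↑k) ↑p
      (PySem.List.pyGetD (vec (nn+1) (fun s => P s p)) ((1 : Int) + ↑k) 0)
      = tbl (nn+1) (gC p (k+1)) := by
  have e : (1 : Int) + ↑k = ↑(k+1) := by push_cast; ring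
  rw [e]
  unfold dpSet2
  simp only [PySem.List.pyGetD_natCast, PySem.List.pySetD_natCast]
  rw [vec_getD _ _ (show k + 1 < nn + 1 by omega), tbl_set _ _ (show k + 1 < nn + 1 by omega)]
  apply tbl_congr
  intro x hx y hy
  unfold gC
  by_cases hxy : x = k + 1 ∧ y = p
  · rw [if_pos hxy, if_pos (by omega), hxy.1, hxy.2, F_pos (by omega) (by omega)]
  · rw [if_neg hxy]
    by_cases hcond : y < p ∨ (y = p ∧ x ≤ k)
    · rw [if_pos hcond, if_pos (by omega)]
    · rw [if_neg hcond, if_neg (by omega)]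

theorem colB (nn p : Nat) (hp1 : 1 ≤ p) (hp : p ≤ nn) :
    (List.range nn).foldl (fun f (k : Nat) =>
      dpSet2 f ((1 : Int) + ↑k) ↑p
        (PySem.List.pyGetD (vec (nn+1) (fun s => P s p)) ((1 : Int) + ↑k) 0))
      (tbl (nn+1) (gC p 0)) = tbl (nn+1) (gC p nn) := by
  apply foldl_range_inv (st := fun k => tbl (nn+1) (gC p k))
  intro k hk
  exact col_step nn p k hp1 hp hk

theorem gC_init (N p : Nat) (hp1 : 1 ≤ p) : tbl N (gB (p-1)) = tbl N (gC p 0) := by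
  apply tbl_congr
  intro x hx y hy
  unfold gB gC
  by_cases h1 : y ≤ p - 1
  · rw [if_pos h1, if_pos (by omega)]
  · rw [if_neg h1]
    by_cases h2 : y < p ∨ (y = p ∧ x ≤ 0)
    · rw [if_pos h2, F_zero (by omega)]
    · rw [if_neg h2]

theorem gC_full (nn p : Nat) : tbl (nn+1) (gC p nn) = tbl (nn+1) (gB p) := by
  apply tbl_congr
  intro x hx y hy
  unfold gB gC
  by_cases h1 : y ≤ p
  · rw [if_pos h1, if_pos (by omega)]
  · rw [if_neg h1, if_neg (by omega)]

theorem gB_init (N : Nat) : tbl N (fun _ _ => (0 : Int)) = tbl N (gB 0) := by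
  apply tbl_congr
  intro x hx y hy
  unfold gB
  by_cases h : y ≤ 0
  · rw [if_pos h, F_zero (by omega)]
  · rw [if_neg h]

theorem gB_full (nn : Nat) : tbl (nn+1) (gB nn) = tbl (nn+1) F := by
  apply tbl_congr
  intro x hx y hy
  unfold gB
  rw [if_pos (by omega)]

theorem d0_eq (N : Nat) : (1 : Int) :: List.replicate N 0 = vec (N+1) (fun s => P s 0) := by
  unfold vec
  rw [List.range_succ_eq_map, List.map_cons, P_zero_left, List.map_map]
  congr 1
  rw [← vec_zero]
  unfold vec
  apply List.map_congr_left
  intro x hx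
  exact (P_succ_zero x).symm

theorem dpB_closed {n : Int} (hn : 0 ≤ n) : dp_alt n = tbl (n.toNat + 1) F := by
  unfold dp_alt
  have h1 : n + 1 - 1 = n := by ring
  have h2 : (n + 1).toNat = n.toNat + 1 := by omega
  have h3 : n + 1 - 0 = n + 1 := by ring
  simp only [PySem.List.pyRange_one, PySem.List.pyRepeat_singleton, h1, h3, h2,
    List.foldl_map, List.map_map]
  rw [← gB_full]
  have hf0 : (List.range (n.toNat + 1)).map
      ((fun _ => List.replicate (n.toNat + 1) (0 : Int)) ∘ (fun k => (0 : Int) + ↑k))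
      = tbl (n.toNat + 1) (gB 0) := by
    rw [← gB_init]
    unfold tbl
    apply List.map_congr_left
    intro x hx
    rw [vec_zero]
    rfl
  rw [hf0, show ([(1 : Int)] ++ List.replicate n.toNat 0) = vec (n.toNat + 1) (fun s => P s 0) from d0_eq n.toNat]
  refine congrArg Prod.fst (foldl_range_inv (st := fun q => (tbl (n.toNat+1) (gB q), vec (n.toNat+1) (fun s => P s q))) n.toNat ?_)
  intro r hr
  dsimp only
  have e : (1 : Int) + ↑r = ↑(r+1) := by omega
  have e4 : (n + 1 - ((1 : Int) + ↑r)).toNat = n.toNat + 1 - (r+1) := by omega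
  simp only [e] at e4 ⊢
  simp only [e4]
  have hs := sweepB n.toNat (r+1) (by omega) (by omega)
  simp only [Nat.add_sub_cancel] at hs
  rw [hs]
  have hci := gC_init (n.toNat+1) (r+1) (by omega)
  simp only [Nat.add_sub_cancel] at hci
  rw [hci, colB n.toNat (r+1) (by omega) (by omega), gC_full]

theorem dpA_neg {n : Int} (hn : n < 0) : dp n = [] := by
  unfold dp
  rw [PySem.List.pyRange_one_eq_nil (show (n : Int) + 1 ≤ 1 by omega),
    PySem.List.pyRange_one_eq_nil (show (n : Int) + 1 ≤ 0 by omega)]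
  simp

theorem dpB_neg {n : Int} (hn : n < 0) : dp_alt n = [] := by
  unfold dp_alt
  rw [PySem.List.pyRange_one_eq_nil (show (n : Int) + 1 ≤ 1 by omega),
    PySem.List.pyRange_one_eq_nil (show (n : Int) + 1 ≤ 0 by omega)]
  simp

-- ===== VERDICT (by name: the statement is the Claim_ definition above) =====
theorem dp_spec : Claim_equal_dp := by
  intro n _
  unfold Spec_dp
  by_cases hn : 0 ≤ n
  · rw [dpA_closed hn, dpB_closed hn]
  · rw [dpA_neg (by omega), dpB_neg (by omega)]
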